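-- pv_equiv track=rewrite | github.com/Mozer/personalized_fan_fiction | 46_preframes_to_klein.py | _parse_prompt_by_character
-- ===== SOURCE A (Python) =====
-- def _parse_prompt_by_character(raw_prompt):
--     """
--     Splits a multi‑character prompt into a dictionary mapping character name
--     to their dialogue/action text.
--     """
--     if not raw_prompt:
--         return {}
--     lines = raw_prompt.strip().split('\n')
--     char_to_prompt = {}
--     for line in lines:
--         if ':' in line:
--             parts = line.split(':', 1)
--             char_name = parts[0].strip()
--             text = parts[1].strip()
--             if char_name in char_to_prompt:
--                 # Concatenate multiple lines for the same character with a space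
--                 char_to_prompt[char_name] += ' ' + text
--             else:
--                 char_to_prompt[char_name] = text
--         # Lines without a colon are ignored (assumed not character‑specific)
--     return char_to_prompt
-- ===== SOURCE B (Python) =====
-- def _parse_prompt_by_character(raw_prompt):
--     """Nested-scan re-implementation: list the distinct character names in
--     first-occurrence order, then for each name rescan the parsed pairs and
--     join that character's fragments with single spaces."""
--     if not raw_prompt:
--         return {}
--     pairs = [tuple(part.strip() for part in line.split(':', 1))
--              for line in raw_prompt.strip().split('\n') if ':' in line]
--     names = []
--     for name, _ in pairs:
--         if name not in names:
--             names.append(name)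
--     return {name: ' '.join(text for n, text in pairs if n == name)
--             for name in names}
-- ===== Notes on version B (the rewrite author's own statement) =====
-- stated objective: alternative
-- what changed: Replaces A's single-pass dict with running string concatenation by a nested-scan algorithm: first compute the distinct character names in first-occurrence order, then for each name rescan all parsed (name, text) pairs and join that character's fragments with spaces; no dict is used for accumulation.
import Mathlib
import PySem

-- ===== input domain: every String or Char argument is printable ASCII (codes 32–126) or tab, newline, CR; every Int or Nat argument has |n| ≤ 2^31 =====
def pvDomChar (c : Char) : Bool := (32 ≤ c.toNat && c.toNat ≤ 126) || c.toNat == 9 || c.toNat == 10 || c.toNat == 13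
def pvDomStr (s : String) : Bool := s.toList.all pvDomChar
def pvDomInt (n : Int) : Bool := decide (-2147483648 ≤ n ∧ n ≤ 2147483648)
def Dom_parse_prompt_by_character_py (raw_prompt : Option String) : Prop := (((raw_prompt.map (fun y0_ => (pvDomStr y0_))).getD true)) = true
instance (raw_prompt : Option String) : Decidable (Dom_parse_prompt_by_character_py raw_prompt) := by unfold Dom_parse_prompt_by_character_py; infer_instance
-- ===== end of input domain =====

-- B is a different algorithm: it computes the distinct character names in
-- first-occurrence order, then for each name rescans all parsed pairs and joins
-- that character's fragments with spaces — no accumulation dict at all.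

-- Python string concatenation a + b (transparent to the kernel, unlike String.append)
def pvCat (a b : String) : String := String.ofList (a.toList ++ b.toList)

-- ===== PORT A =====
def parse_prompt_by_character_py (raw_prompt : Option String) : List (String × String) :=
  match raw_prompt with
  | none => []
  | some s =>
    if s == "" then [] else
      let lines := (PySem.Str.split? (PySem.Str.strip s) "\n").getD []
      (lines.foldl (fun char_to_prompt line =>
        if PySem.Str.isIn ":" line then
          let parts := (PySem.Str.splitMax? line ":" 1).getD []
          let char_name := PySem.Str.strip ((PySem.List.pyGet? parts 0).getD "")
          let text := PySem.Str.strip ((PySem.List.pyGet? parts 1).getD "")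
          if char_to_prompt.contains char_name then
            char_to_prompt.insert char_name
              (pvCat (char_to_prompt.getD char_name "") (pvCat " " text))
          else
            char_to_prompt.insert char_name text
        else char_to_prompt) PySem.Dict.empty).items

-- ===== PORT B =====
-- helper for B: parse one line into (stripped name, stripped text), none if no colon
def pvParseLine (line : String) : Option (String × String) :=
  if PySem.Str.isIn ":" line then
    let parts := (PySem.Str.splitMax? line ":" 1).getD []
    some (PySem.Str.strip ((PySem.List.pyGet? parts 0).getD ""),
          PySem.Str.strip ((PySem.List.pyGet? parts 1).getD ""))
  else none

def parse_prompt_by_character_py_alt (raw_prompt : Option String) : List (String × String) :=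
  match raw_prompt with
  | none => []
  | some s =>
    if s == "" then [] else
      let pairs := ((PySem.Str.split? (PySem.Str.strip s) "\n").getD []).filterMap pvParseLine
      let names := pairs.foldl
        (fun ns p => if ns.contains p.1 then ns else ns ++ [p.1]) ([] : List String)
      names.map (fun n =>
        (n, PySem.Str.join " " ((pairs.filter (fun p => p.1 == n)).map (·.2))))

-- ===== PRECONDITION & SPEC =====
def Spec_parse_prompt_by_character_py (raw_prompt : Option String) (out : List (String × String)) : Prop := out = parse_prompt_by_character_py_alt raw_prompt
instance (raw_prompt : Option String) (out : List (String × String)) : Decidable (Spec_parse_prompt_by_character_py raw_prompt out) := by unfold Spec_parse_prompt_by_character_py; infer_instance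

-- ===== CLAIM (what is proved, stated in full; the proofs are below) =====
def Claim_equal_parse_prompt_by_character_py : Prop := ∀ (raw_prompt : Option String), Dom_parse_prompt_by_character_py raw_prompt → Spec_parse_prompt_by_character_py raw_prompt (parse_prompt_by_character_py raw_prompt)

-- ===== LEMMAS AND PROOFS =====

-- an entry of the intermediate grouping dict, shaped into the corresponding output entry
def pvF (p : String × List String) : String × String := (p.1, PySem.Str.join " " p.2)

-- A's loop body on a parsed pair
def pvStepA (d : PySem.Dict String String) (p : String × String) : PySem.Dict String String :=
  if d.contains p.1 then d.insert p.1 (pvCat (d.getD p.1 "") (pvCat " " p.2))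
  else d.insert p.1 p.2

-- proof-side grouping loop body (fragment lists per name)
def pvStepB (d : PySem.Dict String (List String)) (p : String × String) :
    PySem.Dict String (List String) :=
  d.modify p.1 [] (· ++ [p.2])

lemma pvJoin_nil : PySem.Str.join " " [] = "" := rfl

lemma pvJoin_singleton (t : String) : PySem.Str.join " " [t] = t := by
  simp [PySem.Str.join, PySem.Chars.join_singleton]

lemma pvChars_join_append_singleton (sep : List Char) (l : List (List Char)) (x : List Char)
    (h : l ≠ []) :
    PySem.Chars.join sep (l ++ [x]) = PySem.Chars.join sep l ++ sep ++ x := by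
  induction l with
  | nil => exact absurd rfl h
  | cons a l ih =>
    cases l with
    | nil => simp [PySem.Chars.join_cons_cons, PySem.Chars.join_singleton]
    | cons b l' =>
      have ih' := ih (by simp)
      simp only [List.cons_append] at ih' ⊢
      rw [PySem.Chars.join_cons_cons, ih', PySem.Chars.join_cons_cons]
      simp [List.append_assoc]

lemma pvJoin_append_singleton (l : List String) (t : String) (h : l ≠ []) :
    pvCat (PySem.Str.join " " l) (pvCat " " t) = PySem.Str.join " " (l ++ [t]) := by
  have htl : (pvCat (PySem.Str.join " " l) (pvCat " " t)).toList
      = (PySem.Str.join " " (l ++ [t])).toList := by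
    simp only [pvCat, String.toList_ofList, PySem.Str.toList_join, List.map_append,
      List.map_cons, List.map_nil]
    rw [pvChars_join_append_singleton _ _ _ (by simpa using h)]
    simp [List.append_assoc]
  calc pvCat (PySem.Str.join " " l) (pvCat " " t)
      = String.ofList (pvCat (PySem.Str.join " " l) (pvCat " " t)).toList :=
        String.ofList_toList.symm
    _ = PySem.Str.join " " (l ++ [t]) := by rw [htl, String.ofList_toList]

lemma pvGet?_mk_map (l : List (String × List String)) (k : String) :
    (PySem.Dict.mk (l.map pvF)).get? k
      = ((PySem.Dict.mk l).get? k).map (PySem.Str.join " ") := by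
  induction l with
  | nil => rfl
  | cons p rest ih =>
    obtain ⟨k1, v1⟩ := p
    simp only [List.map_cons, pvF, PySem.Dict.get?_mk_cons]
    split <;> simp [ih]

lemma pvGet?_rel (dA : PySem.Dict String String) (dB : PySem.Dict String (List String))
    (h : dA.items = dB.items.map pvF) (k : String) :
    dA.get? k = (dB.get? k).map (PySem.Str.join " ") := by
  have eA : dA = PySem.Dict.mk (dB.items.map pvF) := PySem.Dict.ext h
  have eB : dB = PySem.Dict.mk dB.items := PySem.Dict.ext rfl
  rw [eA]; conv_rhs => rw [eB]
  exact pvGet?_mk_map dB.items k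

lemma pvContains_rel (dA : PySem.Dict String String) (dB : PySem.Dict String (List String))
    (h : dA.items = dB.items.map pvF) (k : String) :
    dA.contains k = dB.contains k := by
  rw [PySem.Dict.contains_eq_isSome_get?, PySem.Dict.contains_eq_isSome_get?,
    pvGet?_rel dA dB h k]
  cases dB.get? k <;> rfl

lemma pvGetD_rel (dA : PySem.Dict String String) (dB : PySem.Dict String (List String))
    (h : dA.items = dB.items.map pvF) (k : String) :
    dA.getD k "" = PySem.Str.join " " (dB.getD k []) := by
  rw [PySem.Dict.getD_eq_get?_getD, PySem.Dict.getD_eq_get?_getD, pvGet?_rel dA dB h k]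
  cases dB.get? k with
  | none => simpa using pvJoin_nil.symm
  | some v => rfl

-- one step preserves the item relation
lemma pvStep_rel (dA : PySem.Dict String String) (dB : PySem.Dict String (List String))
    (h : dA.items = dB.items.map pvF) (hne : ∀ q ∈ dB.items, q.2 ≠ []) (p : String × String) :
    (pvStepA dA p).items = (pvStepB dB p).items.map pvF := by
  have hmod : pvStepB dB p = dB.insert p.1 (dB.getD p.1 [] ++ [p.2]) := rfl
  have hcont := pvContains_rel dA dB h p.1
  by_cases hc : dB.contains p.1 = true
  · have hcA : dA.contains p.1 = true := by rw [hcont]; exact hc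
    have hvne : dB.getD p.1 [] ≠ [] := by
      rw [PySem.Dict.getD_eq_get?_getD]
      cases hg : dB.get? p.1 with
      | none =>
        rw [PySem.Dict.contains_eq_isSome_get?, hg] at hc; simp at hc
      | some v =>
        exact hne (p.1, v) (PySem.Dict.mem_items_of_get?_eq_some dB hg)
    rw [pvStepA, if_pos hcA, PySem.Dict.items_insert_of_contains dA _ hcA,
      hmod, PySem.Dict.items_insert_of_contains dB _ hc, h, List.map_map, List.map_map]
    refine List.map_congr_left (fun q _ => ?_)
    simp only [Function.comp_apply, pvF]
    by_cases hq : (q.1 == p.1) = true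
    · simp only [hq, if_pos]
      rw [pvGetD_rel dA dB h p.1, pvJoin_append_singleton _ _ hvne]
    · simp [hq]
  · have hcA : dA.contains p.1 = false := by rw [hcont]; exact eq_false_of_ne_true hc
    have hg : dB.getD p.1 [] = [] :=
      PySem.Dict.getD_of_not_contains dB [] (eq_false_of_ne_true hc)
    rw [pvStepA, if_neg (by simp [hcA]), PySem.Dict.items_insert_of_not_contains dA _ hcA,
      hmod, hg, PySem.Dict.items_insert_of_not_contains dB _ (eq_false_of_ne_true hc),
      h, List.map_append]
    simp [pvF, pvJoin_singleton]

-- one step preserves the nonempty-fragments invariant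
lemma pvStep_ne (dB : PySem.Dict String (List String))
    (hne : ∀ q ∈ dB.items, q.2 ≠ []) (p : String × String) :
    ∀ q ∈ (pvStepB dB p).items, q.2 ≠ [] := by
  intro q hq
  have hmod : pvStepB dB p = dB.insert p.1 (dB.getD p.1 [] ++ [p.2]) := rfl
  rw [hmod] at hq
  rcases (PySem.Dict.mem_items_insert dB _ _ q).mp hq with hq | ⟨hq, _⟩
  · subst hq; simp
  · exact hne q hq

-- the whole loop preserves the relation
lemma pvFold_rel (pairs : List (String × String)) (dA : PySem.Dict String String)
    (dB : PySem.Dict String (List String))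
    (h : dA.items = dB.items.map pvF) (hne : ∀ q ∈ dB.items, q.2 ≠ []) :
    (pairs.foldl pvStepA dA).items = (pairs.foldl pvStepB dB).items.map pvF := by
  induction pairs generalizing dA dB with
  | nil => exact h
  | cons p ps ih =>
    exact ih _ _ (pvStep_rel dA dB h hne p) (pvStep_ne dB hne p)

-- A's loop over lines is the pair loop over the parsed lines
lemma pvFoldA_filterMap (lines : List String) (d : PySem.Dict String String) :
    lines.foldl (fun char_to_prompt line =>
        if PySem.Str.isIn ":" line then
          let parts := (PySem.Str.splitMax? line ":" 1).getD []
          let char_name := PySem.Str.strip ((PySem.List.pyGet? parts 0).getD "")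
          let text := PySem.Str.strip ((PySem.List.pyGet? parts 1).getD "")
          if char_to_prompt.contains char_name then
            char_to_prompt.insert char_name
              (pvCat (char_to_prompt.getD char_name "") (pvCat " " text))
          else
            char_to_prompt.insert char_name text
        else char_to_prompt) d
      = (lines.filterMap pvParseLine).foldl pvStepA d := by
  induction lines generalizing d with
  | nil => rfl
  | cons l ls ih =>
    rw [List.foldl_cons, List.filterMap_cons]
    by_cases hc : PySem.Str.isIn ":" l = true
    · simp only [pvParseLine, if_pos hc]
      rw [List.foldl_cons, ih]
      rfl
    · simp only [pvParseLine, if_neg hc]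
      rw [ih]
      rfl

-- the grouping dict's items, read off through keys/getD, are B's nested scan
lemma pvGroup_items (pairs : List (String × String)) :
    (pairs.foldl pvStepB PySem.Dict.empty).items.map pvF
      = (pairs.foldl
          (fun ns p => if ns.contains p.1 then ns else ns ++ [p.1]) ([] : List String)).map
          (fun n => (n, PySem.Str.join " " ((pairs.filter (fun p => p.1 == n)).map (·.2)))) := by
  set G := pairs.foldl pvStepB PySem.Dict.empty with hG
  have hnodup : G.keys.Nodup := by
    rw [hG]
    exact PySem.Dict.nodup_keys_foldl_modify_key pairs (·.1) [] (fun _ p => (· ++ [p.2]))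
      PySem.Dict.empty (by simp)
  have hkeys : G.keys
      = pairs.foldl (fun ns p => if ns.contains p.1 then ns else ns ++ [p.1]) [] := by
    rw [hG]
    show (pairs.foldl (fun d p => d.modify p.1 [] (· ++ [p.2])) PySem.Dict.empty).keys = _
    rw [PySem.Dict.keys_foldl_modify_key]
    have he : (PySem.Dict.empty : PySem.Dict String (List String)).keys = [] := by simp
    rw [he]
    show PySem.Set.update [] (pairs.map Prod.fst)
        = pairs.foldl (fun ns p => PySem.Set.add ns p.1) []
    exact PySem.Set.update_map_eq_foldl_add (s := ([] : List String)) (l := pairs) (f := Prod.fst)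
  have hgetD : ∀ n, G.getD n [] = (pairs.filter (fun p => p.1 == n)).map (·.2) := by
    intro n
    rw [hG]
    show (pairs.foldl (fun d p => d.modify p.1 [] (· ++ [p.2])) PySem.Dict.empty).getD n [] = _
    have := PySem.Dict.getD_foldl_modify_append (l := pairs)
      (d := (PySem.Dict.empty : PySem.Dict String (List String))) (c := n)
    simpa using this
  -- items = keys paired with getD
  have hitems : G.items = G.keys.map (fun k => (k, G.getD k [])) := by
    have h1 : G.keys.map (fun k => (k, G.getD k []))
        = G.items.map (fun q => (q.1, G.getD q.1 [])) := by
      simp [PySem.Dict.keys, List.map_map, Function.comp]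
    have h2 : G.items.map (fun q => (q.1, G.getD q.1 [])) = G.items.map id := by
      refine List.map_congr_left (fun q hq => ?_)
      obtain ⟨k, v⟩ := q
      simp [PySem.Dict.getD_of_mem_items (d := G) hq hnodup]
    rw [h1, h2, List.map_id]
  rw [hitems, ← hkeys, List.map_map]
  exact List.map_congr_left (fun k _ => by simp [Function.comp, pvF, hgetD k])

-- ===== VERDICT (by name: the statement is the Claim_ definition above) =====
theorem parse_prompt_by_character_py_spec : Claim_equal_parse_prompt_by_character_py := by
  intro raw _
  unfold Spec_parse_prompt_by_character_py parse_prompt_by_character_py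
    parse_prompt_by_character_py_alt
  cases raw with
  | none => rfl
  | some s =>
    by_cases hs : (s == "") = true
    · simp [hs]
    · simp only [hs, Bool.false_eq_true, if_false]
      rw [pvFoldA_filterMap,
        pvFold_rel _ PySem.Dict.empty PySem.Dict.empty rfl (by simp [PySem.Dict.empty]),
        pvGroup_items]
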